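-- pv_equiv track=rewrite | github.com/bardia-ab/Ageing_Measurement | resources/data_process.py | extract_delays
-- ===== SOURCE A (Python) =====
-- def extract_delays(shift_values, CUT_indexes, N_Parallel, sps):
--     segments = []
--     while shift_values:
--         segments.append([])
--         while 1:
--             shift_value = shift_values.pop(0)
--             for CUT_idx, val in enumerate(CUT_indexes.pop(0)):
--                 if val == '1':
--                     delay = shift_value * sps
--                     segments[-1].append((CUT_idx, delay))
--
--             if len(segments[-1]) >= N_Parallel:
--                 segments[-1].sort()
--                 break
--
--             if not shift_values:
--                 segments[-1].sort()
--                 break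
--
--             '''prev_shift_value = shift_value
--             if shift_values:
--                 if shift_values[0] > prev_shift_value:
--                     segments[-1].sort()
--                     break
--             else:
--                 segments[-1].sort()
--                 break'''
--
--     return segments
-- ===== SOURCE B (Python) =====
-- def extract_delays(shift_values, CUT_indexes, N_Parallel, sps):
--     # Flat single loop with an explicit accumulator (no nested while); does not
--     # mutate its arguments (A empties both input lists).
--     segments = []
--     current = []
--     pairs = list(zip(shift_values, CUT_indexes))
--     for k, (sv, row) in enumerate(pairs):
--         current += [(i, sv * sps) for i, ch in enumerate(row) if ch == '1']
--         if len(current) >= N_Parallel or k == len(pairs) - 1: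
--             current.sort()
--             segments.append(current)
--             current = []
--     return segments
-- ===== Notes on version B (the rewrite author's own statement) =====
-- stated objective: faster
-- what changed: Replaces A's nested while-loops, which repeatedly pop(0) from the front of both lists (O(n) per pop) and grow segments[-1] in place, with a single flat pass over zip(shift_values, CUT_indexes) maintaining an explicit current-segment accumulator, closed when it reaches N_Parallel hits or the input ends; B also does not mutate the input lists, which A empties.
import Mathlib
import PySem

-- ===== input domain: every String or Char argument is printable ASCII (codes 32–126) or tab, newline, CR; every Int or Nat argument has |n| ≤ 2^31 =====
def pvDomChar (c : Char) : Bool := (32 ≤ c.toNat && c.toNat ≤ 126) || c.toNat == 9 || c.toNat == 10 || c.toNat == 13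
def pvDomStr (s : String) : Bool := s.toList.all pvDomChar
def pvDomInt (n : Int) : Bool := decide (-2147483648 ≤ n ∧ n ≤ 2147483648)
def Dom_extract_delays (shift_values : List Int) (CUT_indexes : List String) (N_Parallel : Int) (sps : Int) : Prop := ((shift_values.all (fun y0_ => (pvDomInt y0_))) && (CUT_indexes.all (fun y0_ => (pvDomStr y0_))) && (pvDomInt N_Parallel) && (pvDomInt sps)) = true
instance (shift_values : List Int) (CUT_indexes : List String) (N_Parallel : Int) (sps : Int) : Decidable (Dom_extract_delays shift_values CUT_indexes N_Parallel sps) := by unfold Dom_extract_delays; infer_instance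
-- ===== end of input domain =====

-- B flattens A's nested while-loops into one pass with an explicit accumulator (same return
-- value; A empties both input lists in place, B does not mutate — return values only are compared).

-- shared helper: the (CUT_idx, shift_value*sps) hits of one row (both Pythons compute this
-- expression, A with a for-loop over enumerate, B with the equivalent comprehension)
def rowHits (row : String) (sv sps : Int) : List (Int × Int) :=
  (PySem.List.enumerate row.toList).filterMap
    (fun p => if p.2 = '1' then some (p.1, sv * sps) else none)

-- Python's list.sort() on (int, int) pairs: stable lexicographic sort
def pySort (xs : List (Int × Int)) : List (Int × Int) :=
  PySem.List.sorted2 xs (fun p => p.1) (fun p => p.2)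

-- ===== PORT A =====
-- inner `while 1`: pops one value/row per step, closes the segment when it is long enough
-- or shift_values ran out; returns (finished segment, remaining shift_values, remaining rows).
-- The fall-through branch is Python's IndexError (CUT_indexes exhausted) — excluded by Pre_.
def innerA (sv : List Int) (cuts : List String) (N_Parallel sps : Int)
    (seg : List (Int × Int)) : List (Int × Int) × List Int × List String :=
  match sv, cuts with
  | v :: svs, c :: cs =>
    let seg := seg ++ rowHits c v sps
    if N_Parallel ≤ (seg.length : Int) then (pySort seg, svs, cs)
    else if svs.isEmpty then (pySort seg, svs, cs)
    else innerA svs cs N_Parallel sps seg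
  | _, _ => (seg, [], [])

-- outer `while shift_values`; fuel = initial length of shift_values (each outer
-- iteration pops at least one element, so this fuel is always sufficient)
def outerA (fuel : Nat) (sv : List Int) (cuts : List String) (N_Parallel sps : Int) :
    List (List (Int × Int)) :=
  match fuel with
  | 0 => []
  | fuel + 1 =>
    if sv.isEmpty then []
    else
      let r := innerA sv cuts N_Parallel sps []
      r.1 :: outerA fuel r.2.1 r.2.2 N_Parallel sps

def extract_delays (shift_values : List Int) (CUT_indexes : List String) (N_Parallel : Int) (sps : Int) : List (List (Int × Int)) :=
  outerA shift_values.length shift_values CUT_indexes N_Parallel sps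

-- ===== PORT B =====
-- single flat loop over the zipped pairs; `rest.isEmpty` is B's `k == len(pairs) - 1`
def altLoop (pairs : List (Int × String)) (N_Parallel sps : Int)
    (current : List (Int × Int)) : List (List (Int × Int)) :=
  match pairs with
  | [] => []
  | (sv, row) :: rest =>
    let current := current ++ rowHits row sv sps
    if N_Parallel ≤ (current.length : Int) ∨ rest.isEmpty then
      pySort current :: altLoop rest N_Parallel sps []
    else
      altLoop rest N_Parallel sps current

def extract_delays_alt (shift_values : List Int) (CUT_indexes : List String) (N_Parallel : Int) (sps : Int) : List (List (Int × Int)) :=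
  altLoop (shift_values.zip CUT_indexes) N_Parallel sps []

-- ===== PRECONDITION & SPEC =====
-- A pops one CUT_indexes row per shift value, so it raises IndexError when
-- CUT_indexes is shorter than shift_values; exactly those inputs are excluded.
def Pre_extract_delays (shift_values : List Int) (CUT_indexes : List String) (N_Parallel : Int) (sps : Int) : Prop :=
  shift_values.length ≤ CUT_indexes.length
instance (shift_values : List Int) (CUT_indexes : List String) (N_Parallel : Int) (sps : Int) : Decidable (Pre_extract_delays shift_values CUT_indexes N_Parallel sps) := by unfold Pre_extract_delays; infer_instance

def pvWitness_extract_delays : List Int × List String × Int × Int :=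
  ([3, 1, 2], ["01", "10", "11"], 2, 10)

def Spec_extract_delays (shift_values : List Int) (CUT_indexes : List String) (N_Parallel : Int) (sps : Int) (out : List (List (Int × Int))) : Prop := out = extract_delays_alt shift_values CUT_indexes N_Parallel sps
instance (shift_values : List Int) (CUT_indexes : List String) (N_Parallel : Int) (sps : Int) (out : List (List (Int × Int))) : Decidable (Spec_extract_delays shift_values CUT_indexes N_Parallel sps out) := by unfold Spec_extract_delays; infer_instance

-- ===== CLAIM (what is proved, stated in full; the proofs are below) =====
def Claim_equal_extract_delays : Prop := ∀ (shift_values : List Int) (CUT_indexes : List String) (N_Parallel : Int) (sps : Int), Dom_extract_delays shift_values CUT_indexes N_Parallel sps → Pre_extract_delays shift_values CUT_indexes N_Parallel sps → Spec_extract_delays shift_values CUT_indexes N_Parallel sps (extract_delays shift_values CUT_indexes N_Parallel sps)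

-- ===== LEMMAS AND PROOFS =====

-- the inner loop consumes at least one element and keeps sv no longer than cuts
theorem innerA_facts (sv : List Int) (cuts : List String) (N sps : Int)
    (seg : List (Int × Int)) (hne : sv ≠ []) (hlen : sv.length ≤ cuts.length) :
    (innerA sv cuts N sps seg).2.1.length < sv.length ∧
      (innerA sv cuts N sps seg).2.1.length ≤ (innerA sv cuts N sps seg).2.2.length := by
  induction sv generalizing cuts seg with
  | nil => exact absurd rfl hne
  | cons v svs ih =>
    cases cuts with
    | nil => simp at hlen
    | cons c cs =>
      simp only [innerA]
      split_ifs with h1 h2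
      · simpa using Nat.lt_of_succ_le (Nat.succ_le_succ (Nat.le_of_succ_le_succ hlen))
      · simp [List.isEmpty_iff] at h2
        simp [h2]
      · have hsvs : svs ≠ [] := by
          intro h; simp [h] at h2
        have := ih cs (seg ++ rowHits c v sps) hsvs (Nat.le_of_succ_le_succ hlen)
        exact ⟨Nat.lt_trans this.1 (Nat.lt_succ_self _), this.2⟩

-- one pass of A's inner loop is a prefix of B's flat loop
theorem inner_step (sv : List Int) (cuts : List String) (N sps : Int)
    (cur : List (Int × Int)) (hne : sv ≠ []) (hlen : sv.length ≤ cuts.length) :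
    altLoop (sv.zip cuts) N sps cur =
      (innerA sv cuts N sps cur).1 ::
        altLoop ((innerA sv cuts N sps cur).2.1.zip (innerA sv cuts N sps cur).2.2)
          N sps [] := by
  induction sv generalizing cuts cur with
  | nil => exact absurd rfl hne
  | cons v svs ih =>
    cases cuts with
    | nil => simp at hlen
    | cons c cs =>
      have hlen' : svs.length ≤ cs.length := Nat.le_of_succ_le_succ hlen
      simp only [List.zip_cons_cons, altLoop, innerA]
      by_cases h1 : N ≤ (cur.length : Int) + ((rowHits c v sps).length : Int)
      · simp [h1]
      · by_cases h2 : svs = []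
        · simp [h1, h2, altLoop]
        · have hcs : cs ≠ [] := by
            intro h; subst h
            exact h2 (List.eq_nil_of_length_eq_zero (Nat.le_zero.mp hlen'))
          simpa [h1, h2, hcs] using ih cs (cur ++ rowHits c v sps) h2 hlen'

theorem outer_eq (fuel : Nat) (sv : List Int) (cuts : List String) (N sps : Int)
    (hfuel : sv.length ≤ fuel) (hlen : sv.length ≤ cuts.length) :
    outerA fuel sv cuts N sps = altLoop (sv.zip cuts) N sps [] := by
  induction fuel generalizing sv cuts with
  | zero =>
    have : sv = [] := List.eq_nil_of_length_eq_zero (Nat.le_zero.mp hfuel)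
    simp [this, outerA, altLoop]
  | succ fuel ih =>
    by_cases hne : sv = []
    · simp [hne, outerA, altLoop]
    · have hfacts := innerA_facts sv cuts N sps [] hne hlen
      simp only [outerA, List.isEmpty_iff, if_neg hne]
      rw [inner_step sv cuts N sps [] hne hlen,
        ih _ _ (by omega) hfacts.2]

-- ===== VERDICT (by name: the statement is the Claim_ definition above) =====
theorem extract_delays_spec : Claim_equal_extract_delays := by
  intro sv cuts N sps _ hpre
  unfold Spec_extract_delays extract_delays extract_delays_alt
  exact outer_eq sv.length sv cuts N sps le_rfl hpre
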